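-- pv_equiv track=rewrite | github.com/Javilejoo/Lexical-Analyzer-Generator | analizadorLexico.py | eliminar_comentarios
-- ===== SOURCE A (Python) =====
-- def eliminar_comentarios(texto):
--     resultado = ""
--     i = 0
--     while i < len(texto):
--         if i + 1 < len(texto) and texto[i:i+2] == "(*":
--             # Buscar el cierre del comentario
--             fin_comentario = texto.find("*)", i+2)
--             if fin_comentario != -1:
--                 i = fin_comentario + 2
--             else:
--                 # Si no hay cierre, avanzar
--                 i += 2
--         else:
--             resultado += texto[i]
--             i += 1
--     return resultado
-- ===== SOURCE B (Python) =====
-- def eliminar_comentarios(texto):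
--     partes = []
--     i = 0
--     while True:
--         start = texto.find('(*', i)
--         if start == -1:
--             partes.append(texto[i:])
--             break
--         partes.append(texto[i:start])
--         fin = texto.find('*)', start + 2)
--         i = fin + 2 if fin != -1 else start + 2
--     return ''.join(partes)
-- ===== Notes on version B (the rewrite author's own statement) =====
-- stated objective: simpler
-- what changed: Replaces A's per-character while-loop (building the result by one-char string concatenations) with a chunk scanner that uses str.find to locate each '(*' opener, copies whole slices between comments into a list, and joins them once at the end.
import Mathlib
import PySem

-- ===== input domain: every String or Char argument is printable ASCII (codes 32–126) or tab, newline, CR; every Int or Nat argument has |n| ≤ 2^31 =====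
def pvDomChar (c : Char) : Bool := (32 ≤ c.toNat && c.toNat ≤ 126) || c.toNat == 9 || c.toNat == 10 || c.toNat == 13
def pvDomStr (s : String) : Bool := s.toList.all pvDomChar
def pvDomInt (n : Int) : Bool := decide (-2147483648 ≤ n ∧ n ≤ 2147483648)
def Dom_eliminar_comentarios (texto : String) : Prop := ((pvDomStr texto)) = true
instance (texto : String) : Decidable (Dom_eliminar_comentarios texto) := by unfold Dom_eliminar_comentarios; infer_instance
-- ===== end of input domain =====

-- B is a chunk scanner (find the next "(*", copy the whole chunk before it, then jump past
-- the matching "*)"), replacing A's char-by-char copy loop; objective: simpler decomposition.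

-- Shared primitive (both Pythons use str.find of a two-char pattern): split a list at the
-- first occurrence of the pattern [a, b]; returns (text before it, text after it), or none.
def pvSplit2 (a b : Char) : List Char → Option (List Char × List Char)
  | [] => none
  | c :: rest =>
    if c = a ∧ rest.head? = some b then some ([], rest.tail)
    else (pvSplit2 a b rest).map (fun p => (c :: p.1, p.2))

theorem pvSplit2_some_lt {a b : Char} : ∀ {l p s : List Char},
    pvSplit2 a b l = some (p, s) → s.length < l.length := by
  intro l
  induction l with
  | nil => intro p s h; simp [pvSplit2] at h
  | cons c rest ih =>
    intro p s h
    by_cases hc : c = a ∧ rest.head? = some b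
    · simp only [pvSplit2, if_pos hc, Option.some.injEq, Prod.mk.injEq] at h
      obtain ⟨h1, h2⟩ := h
      subst h2
      cases rest <;> simp
    · simp only [pvSplit2, if_neg hc, Option.map_eq_some_iff] at h
      obtain ⟨⟨q, t⟩, hqt, hft⟩ := h
      have hs : t = s := congrArg Prod.snd hft
      subst hs
      have := ih hqt
      simp
      omega

-- ===== PORT A =====
-- A's while-loop over index i, transliterated as structural recursion on the remaining
-- suffix of the text (resultado is the accumulator res); find("*)", i+2) is pvSplit2 on
-- the suffix after the "(*".
def pvGoA : List Char → List Char → List Char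
  | [], res => res
  | c :: rest, res =>
    if c = '(' ∧ rest.head? = some '*' then
      match h : pvSplit2 '*' ')' rest.tail with
      | some (_, after) => pvGoA after res
      | none => pvGoA rest.tail res
    else pvGoA rest (res ++ [c])
termination_by l _ => l.length
decreasing_by
  · have := pvSplit2_some_lt h
    cases rest <;> simp_all <;> omega
  · cases rest <;> simp <;> omega
  · simp

def eliminar_comentarios (texto : String) : String :=
  String.ofList (pvGoA texto.toList [])

-- ===== PORT B =====
-- B's chunk loop: each round finds the next "(*" (pvSplit2 on the current suffix), emits the
-- chunk before it, and skips to just after the matching "*)" (or just past the opener if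
-- there is none); the chunks are joined at the end.
def pvGoB (cs : List Char) : List (List Char) :=
  match h1 : pvSplit2 '(' '*' cs with
  | none => [cs]
  | some (pre, afterOpen) =>
    match h2 : pvSplit2 '*' ')' afterOpen with
    | some (_, after) => pre :: pvGoB after
    | none => pre :: pvGoB afterOpen
termination_by cs.length
decreasing_by
  · have h1' := pvSplit2_some_lt h1
    have h2' := pvSplit2_some_lt h2
    omega
  · exact pvSplit2_some_lt h1

def eliminar_comentarios_alt (texto : String) : String :=
  String.ofList (pvGoB texto.toList).flatten

-- ===== PRECONDITION & SPEC =====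
def Spec_eliminar_comentarios (texto : String) (out : String) : Prop := out = eliminar_comentarios_alt texto
instance (texto : String) (out : String) : Decidable (Spec_eliminar_comentarios texto out) := by unfold Spec_eliminar_comentarios; infer_instance

-- ===== CLAIM (what is proved, stated in full; the proofs are below) =====
def Claim_equal_eliminar_comentarios : Prop := ∀ (texto : String), Dom_eliminar_comentarios texto → Spec_eliminar_comentarios texto (eliminar_comentarios texto)

-- ===== LEMMAS AND PROOFS =====

-- Evaluation of A's loop at an opener "(*": unterminated comment.
theorem pvGoA_open_none {s : List Char} (res : List Char)
    (h : pvSplit2 '*' ')' s = none) :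
    pvGoA ('(' :: '*' :: s) res = pvGoA s res := by
  rw [pvGoA]
  rw [if_pos ⟨rfl, rfl⟩]
  split
  · rename_i x y heq
    rw [List.tail_cons, h] at heq
    cases heq
  · rfl

-- Evaluation of A's loop at an opener "(*": closed comment.
theorem pvGoA_open_some {s m a : List Char} (res : List Char)
    (h : pvSplit2 '*' ')' s = some (m, a)) :
    pvGoA ('(' :: '*' :: s) res = pvGoA a res := by
  rw [pvGoA]
  rw [if_pos ⟨rfl, rfl⟩]
  split
  · rename_i x y heq
    rw [List.tail_cons, h] at heq
    injection heq with heq'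
    injection heq' with e1 e2
    subst e1; subst e2
    rfl
  · rename_i heq
    rw [List.tail_cons, h] at heq
    cases heq

-- Evaluation of B's loop: no opener left.
theorem pvGoB_none {cs : List Char} (h : pvSplit2 '(' '*' cs = none) :
    pvGoB cs = [cs] := by
  rw [pvGoB]
  split
  · rfl
  · rename_i p q heq
    rw [h] at heq
    cases heq

-- Evaluation of B's loop: opener with a closer.
theorem pvGoB_some_some {cs pre afterOpen m after : List Char}
    (h1 : pvSplit2 '(' '*' cs = some (pre, afterOpen))
    (h2 : pvSplit2 '*' ')' afterOpen = some (m, after)) :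
    pvGoB cs = pre :: pvGoB after := by
  rw [pvGoB]
  split
  · rename_i heq; rw [h1] at heq; cases heq
  · rename_i p q heq
    rw [h1] at heq
    injection heq with heq'
    injection heq' with e1 e2
    subst e1; subst e2
    split
    · rename_i x y heq2
      rw [h2] at heq2
      injection heq2 with heq2'
      injection heq2' with f1 f2
      subst f1; subst f2
      rfl
    · rename_i heq2
      rw [h2] at heq2
      cases heq2

-- Evaluation of B's loop: opener without a closer.
theorem pvGoB_some_none {cs pre afterOpen : List Char}
    (h1 : pvSplit2 '(' '*' cs = some (pre, afterOpen))
    (h2 : pvSplit2 '*' ')' afterOpen = none) :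
    pvGoB cs = pre :: pvGoB afterOpen := by
  rw [pvGoB]
  split
  · rename_i heq; rw [h1] at heq; cases heq
  · rename_i p q heq
    rw [h1] at heq
    injection heq with heq'
    injection heq' with e1 e2
    subst e1; subst e2
    split
    · rename_i x y heq2
      rw [h2] at heq2
      cases heq2
    · rfl

-- If the text contains no "(*" at all, A's loop copies it verbatim.
theorem pvGoA_no_open : ∀ {cs : List Char} (res : List Char),
    pvSplit2 '(' '*' cs = none → pvGoA cs res = res ++ cs := by
  intro cs
  induction cs with
  | nil => intro res _; simp [pvGoA]
  | cons c rest ih =>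
    intro res h
    by_cases hc : c = '(' ∧ rest.head? = some '*'
    · simp [pvSplit2, hc] at h
    · simp only [pvSplit2, if_neg hc, Option.map_eq_none_iff] at h
      rw [pvGoA]
      simp only [if_neg hc]
      rw [ih _ h]
      simp

-- Up to the first "(*", A's loop just copies characters into the accumulator.
theorem pvGoA_to_open : ∀ {cs pre s : List Char} (res : List Char),
    pvSplit2 '(' '*' cs = some (pre, s) →
    pvGoA cs res = pvGoA ('(' :: '*' :: s) (res ++ pre) := by
  intro cs
  induction cs with
  | nil => intro pre s res h; simp [pvSplit2] at h
  | cons c rest ih =>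
    intro pre s res h
    by_cases hc : c = '(' ∧ rest.head? = some '*'
    · simp only [pvSplit2, if_pos hc, Option.some.injEq, Prod.mk.injEq] at h
      obtain ⟨h1, h2⟩ := h
      obtain ⟨hc1, hc2⟩ := hc
      subst hc1
      cases rest with
      | nil => simp at hc2
      | cons d t =>
        simp at hc2
        simp at h2
        subst hc2
        subst h2
        subst h1
        simp
    · simp only [pvSplit2, if_neg hc, Option.map_eq_some_iff] at h
      obtain ⟨⟨q, t⟩, hqt, hft⟩ := h
      have hq : c :: q = pre := congrArg Prod.fst hft
      have ht : t = s := congrArg Prod.snd hft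
      subst hq; subst ht
      rw [pvGoA]
      simp only [if_neg hc]
      rw [ih (res ++ [c]) hqt]
      simp

theorem pvGoB_nil_eval : pvGoB ([] : List Char) = [[]] := pvGoB_none rfl

-- Main invariant: A's loop produces the accumulator followed by B's joined chunks.
theorem pvGoA_eq_goB : ∀ (n : ℕ) (cs res : List Char), cs.length ≤ n →
    pvGoA cs res = res ++ (pvGoB cs).flatten := by
  intro n
  induction n with
  | zero =>
    intro cs res h
    have : cs = [] := by cases cs <;> simp_all
    subst this
    rw [pvGoB_nil_eval]
    simp [pvGoA]
  | succ n ih =>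
    intro cs res hlen
    cases h1 : pvSplit2 '(' '*' cs with
    | none =>
      rw [pvGoB_none h1]
      simpa using pvGoA_no_open res h1
    | some p =>
      obtain ⟨pre, afterOpen⟩ := p
      have hlt1 := pvSplit2_some_lt h1
      rw [pvGoA_to_open res h1]
      cases h2 : pvSplit2 '*' ')' afterOpen with
      | none =>
        rw [pvGoA_open_none _ h2, pvGoB_some_none h1 h2,
            ih afterOpen (res ++ pre) (by omega)]
        simp
      | some q =>
        obtain ⟨mid, after⟩ := q
        have hlt2 := pvSplit2_some_lt h2
        rw [pvGoA_open_some _ h2, pvGoB_some_some h1 h2,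
            ih after (res ++ pre) (by omega)]
        simp

-- ===== VERDICT (by name: the statement is the Claim_ definition above) =====
theorem eliminar_comentarios_spec : Claim_equal_eliminar_comentarios := by
  intro texto _
  unfold Spec_eliminar_comentarios eliminar_comentarios eliminar_comentarios_alt
  rw [pvGoA_eq_goB texto.toList.length texto.toList [] (le_refl _)]
  simp
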